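-- pv_equiv track=rewrite | github.com/apprenticelearner/AL_Core | planners/fo_planner.py | get_variablized_keys_rec
-- ===== SOURCE A (Python) =====
-- def get_variablized_keys_rec(key):
--     if len(key) > 0:
--         for sub_key in get_variablized_keys_rec(key[1:]):
--             yield key[:1] + sub_key
--
--             if key[0] is not None and key[0] != '?':
--                 yield ('?',) + sub_key
--     else:
--         yield tuple()
-- ===== SOURCE B (Python) =====
-- def get_variablized_keys_rec(key):
--     # Iterative product-style enumeration: per-position choice lists, folded
--     # back-to-front so the leftmost position varies fastest (A's order).
--     choices = [[x] if x is None or x == '?' else [x, '?'] for x in key]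
--     res = [()]
--     for ch in reversed(choices):
--         res = [(c,) + t for t in res for c in ch]
--     for r in res:
--         yield r
-- ===== Notes on version B (the rewrite author's own statement) =====
-- stated objective: idiomatic
-- what changed: Replaced the generator recursion by an iterative product-style enumeration: build per-position choice lists and fold them back-to-front into the list of combinations.
import Mathlib
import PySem

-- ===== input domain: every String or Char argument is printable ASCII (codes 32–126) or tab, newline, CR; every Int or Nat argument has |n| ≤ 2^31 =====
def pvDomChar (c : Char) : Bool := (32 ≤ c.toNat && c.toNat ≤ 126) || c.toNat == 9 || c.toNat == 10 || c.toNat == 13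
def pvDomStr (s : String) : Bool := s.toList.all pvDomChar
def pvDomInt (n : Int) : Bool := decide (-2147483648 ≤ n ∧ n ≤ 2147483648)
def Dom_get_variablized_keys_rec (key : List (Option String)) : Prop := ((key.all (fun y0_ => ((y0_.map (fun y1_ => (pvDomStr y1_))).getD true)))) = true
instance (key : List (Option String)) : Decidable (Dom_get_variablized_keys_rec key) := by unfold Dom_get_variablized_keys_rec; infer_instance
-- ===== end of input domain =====

-- ===== PORT A =====
def get_variablized_keys_rec (key : List (Option String)) : List (List (Option String)) :=
  match key with
  | [] => [[]]
  | k0 :: rest =>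
    (get_variablized_keys_rec rest).flatMap (fun sub =>
      if k0 ≠ none ∧ k0 ≠ some "?" then [k0 :: sub, some "?" :: sub] else [k0 :: sub])

-- ===== PORT B =====
def pvChoicesOf (x : Option String) : List (Option String) :=
  if x = none ∨ x = some "?" then [x] else [x, some "?"]

def get_variablized_keys_rec_alt (key : List (Option String)) : List (List (Option String)) :=
  (key.map pvChoicesOf).reverse.foldl
    (fun res ch => res.flatMap (fun t => ch.map (fun c => c :: t))) [[]]

-- ===== PRECONDITION & SPEC =====
def Spec_get_variablized_keys_rec (key : List (Option String)) (out : List (List (Option String))) : Prop := out = get_variablized_keys_rec_alt key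
instance (key : List (Option String)) (out : List (List (Option String))) : Decidable (Spec_get_variablized_keys_rec key out) := by unfold Spec_get_variablized_keys_rec; infer_instance

-- ===== CLAIM (what is proved, stated in full; the proofs are below) =====
def Claim_equal_get_variablized_keys_rec : Prop := ∀ (key : List (Option String)), Dom_get_variablized_keys_rec key → Spec_get_variablized_keys_rec key (get_variablized_keys_rec key)

-- ===== LEMMAS AND PROOFS =====

-- ===== VERDICT (by name: the statement is the Claim_ definition above) =====
lemma alt_cons (x : Option String) (xs : List (Option String)) :
    get_variablized_keys_rec_alt (x :: xs) =
      (get_variablized_keys_rec_alt xs).flatMap (fun t => (pvChoicesOf x).map (fun c => c :: t)) := by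
  simp [get_variablized_keys_rec_alt, List.foldl_append]

lemma choices_map (x : Option String) (t : List (Option String)) :
    (pvChoicesOf x).map (fun c => c :: t) =
      (if x ≠ none ∧ x ≠ some "?" then [x :: t, some "?" :: t] else [x :: t]) := by
  unfold pvChoicesOf
  by_cases h : x = none ∨ x = some "?" <;> simp [h] <;> tauto

theorem get_variablized_keys_rec_spec : Claim_equal_get_variablized_keys_rec := by
  intro key hd
  clear hd
  unfold Spec_get_variablized_keys_rec
  induction key with
  | nil => rfl
  | cons x xs ih =>
    rw [alt_cons, ← ih]
    simp only [get_variablized_keys_rec, choices_map]
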